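-- pv_equiv track=rewrite | github.com/Dgodman/summit | summit.py | combine_quotes
-- ===== SOURCE A (Python) =====
-- def combine_quotes(sent_tokens):
--     sentences = []
--     index = 0
--     while index < len(sent_tokens):
--         s1 = sent_tokens[index]
--         if index+1 < len(sent_tokens):
--             s2 = sent_tokens[index+1]
--         else:
--             s2 = ""
--         if s1.count('"') == 1 and s2.count('"') == 1:
--             s1 += " " + s2
--             index += 2
--         else:
--             index += 1
--         sentences.append(s1)
--     return sentences
-- ===== SOURCE B (Python) =====
-- def combine_quotes(sent_tokens):
--     sentences = []
--     pending = None
--     for token in sent_tokens: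
--         if pending is not None:
--             if token.count('"') == 1:
--                 sentences.append(pending + " " + token)
--             else:
--                 sentences.append(pending)
--                 sentences.append(token)
--             pending = None
--         elif token.count('"') == 1:
--             pending = token
--         else:
--             sentences.append(token)
--     if pending is not None:
--         sentences.append(pending)
--     return sentences
-- ===== Notes on version B (the rewrite author's own statement) =====
-- stated objective: simpler
-- what changed: Replaced the index-based while loop with look-ahead and +=2 stepping by a single for loop over the tokens that holds at most one unmatched one-quote token in a 'pending' variable, flushed or merged on the next token.
import Mathlib
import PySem

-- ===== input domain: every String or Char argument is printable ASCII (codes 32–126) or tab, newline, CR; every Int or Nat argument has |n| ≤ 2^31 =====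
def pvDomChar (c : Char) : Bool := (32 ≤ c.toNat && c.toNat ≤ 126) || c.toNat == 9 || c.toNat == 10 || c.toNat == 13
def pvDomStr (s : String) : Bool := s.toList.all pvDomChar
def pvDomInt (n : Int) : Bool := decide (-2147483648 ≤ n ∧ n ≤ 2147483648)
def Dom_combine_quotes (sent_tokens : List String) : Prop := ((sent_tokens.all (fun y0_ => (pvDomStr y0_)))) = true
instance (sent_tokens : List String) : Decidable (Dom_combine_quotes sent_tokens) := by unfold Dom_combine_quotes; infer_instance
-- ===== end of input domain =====

-- B replaces A's index/look-ahead while loop by a single for loop holding one unmatched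
-- one-quote token in a 'pending' variable (simpler decomposition; same O(n) cost).


-- ===== PORT A =====
-- while loop with index, look-ahead s2 and += 2 stepping, ported step for step
def combine_quotes_go (sent_tokens : List String) (index : Nat) (sentences : List String) :
    List String :=
  if h : index < sent_tokens.length then
    -- s1 = sent_tokens[index]; s2 = look-ahead token or "" at the end
    if PySem.Str.count sent_tokens[index] "\"" = 1 ∧
        PySem.Str.count (if h2 : index + 1 < sent_tokens.length then sent_tokens[index + 1]
          else "") "\"" = 1 then
      combine_quotes_go sent_tokens (index + 2)
        (sentences ++ [sent_tokens[index] ++ " " ++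
          (if h2 : index + 1 < sent_tokens.length then sent_tokens[index + 1] else "")])
    else
      combine_quotes_go sent_tokens (index + 1) (sentences ++ [sent_tokens[index]])
  else
    sentences
termination_by sent_tokens.length - index

def combine_quotes (sent_tokens : List String) : List String :=
  combine_quotes_go sent_tokens 0 []

-- ===== PORT B =====
-- one fold over the tokens; state = (sentences so far, pending one-quote token)
def combine_quotes_alt_step (st : List String × Option String) (token : String) :
    List String × Option String :=
  match st.2 with
  | some pending =>
      if PySem.Str.count token "\"" = 1 then
        (st.1 ++ [pending ++ " " ++ token], none)
      else
        (st.1 ++ [pending] ++ [token], none)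
  | none =>
      if PySem.Str.count token "\"" = 1 then
        (st.1, some token)
      else
        (st.1 ++ [token], none)

def combine_quotes_alt (sent_tokens : List String) : List String :=
  let st := sent_tokens.foldl combine_quotes_alt_step ([], none)
  match st.2 with
  | some pending => st.1 ++ [pending]
  | none => st.1

-- ===== PRECONDITION & SPEC =====
def Spec_combine_quotes (sent_tokens : List String) (out : List String) : Prop := out = combine_quotes_alt sent_tokens
instance (sent_tokens : List String) (out : List String) : Decidable (Spec_combine_quotes sent_tokens out) := by unfold Spec_combine_quotes; infer_instance

-- ===== CLAIM (what is proved, stated in full; the proofs are below) =====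
def Claim_equal_combine_quotes : Prop := ∀ (sent_tokens : List String), Dom_combine_quotes sent_tokens → Spec_combine_quotes sent_tokens (combine_quotes sent_tokens)

-- ===== LEMMAS AND PROOFS =====

-- pure spine of the state machine: what B emits from the remaining tokens and the pending slot
def fsm : List String → Option String → List String
  | [], none => []
  | [], some p => [p]
  | tok :: rest, some p =>
      if PySem.Str.count tok "\"" = 1 then (p ++ " " ++ tok) :: fsm rest none
      else p :: tok :: fsm rest none
  | tok :: rest, none =>
      if PySem.Str.count tok "\"" = 1 then fsm rest (some tok)
      else tok :: fsm rest none

theorem fsm_foldl (l : List String) (acc : List String) (p : Option String) :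
    (match (l.foldl combine_quotes_alt_step (acc, p)).2 with
      | some pending => (l.foldl combine_quotes_alt_step (acc, p)).1 ++ [pending]
      | none => (l.foldl combine_quotes_alt_step (acc, p)).1) = acc ++ fsm l p := by
  induction l generalizing acc p with
  | nil => cases p <;> simp [fsm]
  | cons tok rest ih =>
      rw [List.foldl_cons]
      cases p with
      | none =>
          by_cases h : PySem.Str.count tok "\"" = 1
          · simp only [combine_quotes_alt_step, if_pos h]
            rw [ih acc (some tok)]
            simp only [fsm, if_pos h]
          · simp only [combine_quotes_alt_step, if_neg h]
            rw [ih (acc ++ [tok]) none]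
            simp only [fsm, if_neg h]
            simp
      | some q =>
          by_cases h : PySem.Str.count tok "\"" = 1
          · simp only [combine_quotes_alt_step, if_pos h]
            rw [ih (acc ++ [q ++ " " ++ tok]) none]
            simp only [fsm, if_pos h]
            simp
          · simp only [combine_quotes_alt_step, if_neg h]
            rw [ih (acc ++ [q] ++ [tok]) none]
            simp only [fsm, if_neg h]
            simp

theorem combine_quotes_alt_eq_fsm (sent_tokens : List String) :
    combine_quotes_alt sent_tokens = fsm sent_tokens none := by
  have := fsm_foldl sent_tokens [] none
  simpa [combine_quotes_alt] using this

-- A's loop, expressed over the suffix it still has to read, produces the fsm spine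
theorem combine_quotes_go_eq (sent_tokens : List String) :
    ∀ index acc, combine_quotes_go sent_tokens index acc
      = acc ++ fsm (sent_tokens.drop index) none := by
  intro index
  induction hfuel : sent_tokens.length - index using Nat.strong_induction_on
    generalizing index with
  | _ fuel ih =>
    intro acc
    rw [combine_quotes_go]
    by_cases h : index < sent_tokens.length
    · have hdrop : sent_tokens.drop index = sent_tokens[index] :: sent_tokens.drop (index + 1) :=
        List.drop_eq_getElem_cons h
      rw [dif_pos h, hdrop]
      by_cases h2 : index + 1 < sent_tokens.length
      · have hdrop2 : sent_tokens.drop (index + 1)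
            = sent_tokens[index + 1] :: sent_tokens.drop (index + 2) :=
          List.drop_eq_getElem_cons h2
        rw [dif_pos h2, hdrop2]
        by_cases hc1 : PySem.Str.count sent_tokens[index] "\"" = 1
        · by_cases hc2 : PySem.Str.count sent_tokens[index + 1] "\"" = 1
          · rw [if_pos ⟨hc1, hc2⟩]
            rw [ih (sent_tokens.length - (index + 2)) (by omega) (index + 2) rfl]
            simp only [fsm, if_pos hc1, if_pos hc2]
            simp
          · rw [if_neg (fun hx => hc2 hx.2)]
            rw [ih (sent_tokens.length - (index + 1)) (by omega) (index + 1) rfl, hdrop2]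
            simp only [fsm, if_pos hc1, if_neg hc2]
            simp
        · rw [if_neg (fun hx => hc1 hx.1)]
          rw [ih (sent_tokens.length - (index + 1)) (by omega) (index + 1) rfl, hdrop2]
          simp only [fsm, if_neg hc1]
          simp
      · have hnil : sent_tokens.drop (index + 1) = [] :=
          List.drop_eq_nil_of_le (by omega)
        rw [dif_neg h2, hnil]
        have hc2 : ¬ PySem.Str.count "" "\"" = 1 := by decide
        by_cases hc1 : PySem.Str.count sent_tokens[index] "\"" = 1
        · rw [if_neg (fun hx => hc2 hx.2)]
          rw [ih (sent_tokens.length - (index + 1)) (by omega) (index + 1) rfl, hnil]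
          simp only [fsm, if_pos hc1]
          simp
        · rw [if_neg (fun hx => hc1 hx.1)]
          rw [ih (sent_tokens.length - (index + 1)) (by omega) (index + 1) rfl, hnil]
          simp only [fsm, if_neg hc1]
          simp
    · rw [dif_neg h]
      have hnil : sent_tokens.drop index = [] := List.drop_eq_nil_of_le (by omega)
      rw [hnil]
      simp [fsm]

-- ===== VERDICT (by name: the statement is the Claim_ definition above) =====
theorem combine_quotes_spec : Claim_equal_combine_quotes := by
  intro sent_tokens _
  unfold Spec_combine_quotes
  rw [combine_quotes_alt_eq_fsm, combine_quotes, combine_quotes_go_eq]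
  simp
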